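-- pv_equiv track=rewrite | github.com/serotonins/ctpo | src/programmers/12987_숫자_게임/jh_숫자_게임.py | solution
-- ===== SOURCE A (Python) =====
-- from bisect import bisect_right
--
-- def solution(A, B):
--     answer = 0
--     B.sort()
--     idx_bigger_than_a = set()
--     for a in A:
--         idx = bisect_right(B,a)
--         while idx in idx_bigger_than_a:
--             idx += 1
--         if idx < len(B):
--             idx_bigger_than_a.add(idx)
--             answer += 1
--     return answer
-- ===== SOURCE B (Python) =====
-- def solution(A, B):
--     # Sort both arrays and do a single two-pointer sweep:
--     # each b in ascending order matches the smallest still-unmatched a it beats.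
--     B.sort()  # A also sorts B in place; keep the same side effect
--     As = sorted(A)
--     i = 0
--     for b in B:
--         if i < len(As) and As[i] < b:
--             i += 1
--     return i
-- ===== Notes on version B (the rewrite author's own statement) =====
-- stated objective: faster
-- what changed: Replaced the per-element bisect plus linear scan over an ever-growing used-index set by sorting both lists once and a single two-pointer sweep.
import Mathlib
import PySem

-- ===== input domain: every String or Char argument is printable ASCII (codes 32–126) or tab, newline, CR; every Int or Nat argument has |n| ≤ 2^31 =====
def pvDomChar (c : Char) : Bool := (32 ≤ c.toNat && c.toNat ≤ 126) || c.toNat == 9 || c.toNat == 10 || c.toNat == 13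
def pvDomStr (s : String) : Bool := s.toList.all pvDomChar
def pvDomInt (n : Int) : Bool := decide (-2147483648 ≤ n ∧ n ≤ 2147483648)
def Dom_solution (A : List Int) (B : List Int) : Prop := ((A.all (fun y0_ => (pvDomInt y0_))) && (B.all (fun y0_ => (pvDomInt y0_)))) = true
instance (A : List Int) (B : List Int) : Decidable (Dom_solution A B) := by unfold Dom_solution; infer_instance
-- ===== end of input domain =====

-- B replaces A's per-element bisect plus linear skip over a grown used-index set by sorting
-- both lists once and one two-pointer sweep.  Like A, the Python B sorts B in place (same
-- side effect); the theorems below are about the return value.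

-- ===== PORT A =====

theorem skipUsed_dec (S : List Nat) (i : Nat) (h : i ∈ S) :
    (S.countP (fun j => decide (i + 1 ≤ j))) < (S.countP (fun j => decide (i ≤ j))) := by
  induction S with
  | nil => cases h
  | cons x xs ih =>
    have hmono : xs.countP (fun j => decide (i + 1 ≤ j)) ≤ xs.countP (fun j => decide (i ≤ j)) :=
      List.countP_mono_left (fun a _ hp => by
        simp only [decide_eq_true_eq] at *; omega)
    simp only [List.countP_cons]
    rcases List.mem_cons.mp h with h' | hx
    · subst h'
      rw [show (decide (i + 1 ≤ i)) = false by simp, show (decide (i ≤ i)) = true by simp]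
      simp only [Bool.false_eq_true, if_false, if_true]
      omega
    · have := ih hx
      rcases Bool.eq_false_or_eq_true (decide (i + 1 ≤ x)) with h1 | h1 <;>
        rcases Bool.eq_false_or_eq_true (decide (i ≤ x)) with h2 | h2 <;>
          rw [h1, h2] <;>
          simp only [Bool.false_eq_true, if_false, if_true] <;>
          simp only [decide_eq_true_eq, decide_eq_false_iff_not] at h1 h2 <;> omega

def skipUsed (S : PySem.Set Nat) (i : Nat) : Nat :=
  if i ∈ S then skipUsed S (i + 1) else i
termination_by S.countP (fun j => decide (i ≤ j))
decreasing_by exact skipUsed_dec S i (by assumption)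

def solution (A : List Int) (B : List Int) : Int :=
  let Bs := PySem.List.sorted B (fun x => x)          -- B.sort()
  -- for a in A: idx = bisect_right(B, a); while idx in set: idx += 1; if idx < len(B): add, count
  (A.foldl (fun st a =>
      let idx := skipUsed st.1 (PySem.List.bisectRight Bs a)
      if idx < Bs.length then (st.1.add idx, st.2 + 1) else st)
    (PySem.Set.empty, 0)).2

-- ===== PORT B =====
def solution_alt (A : List Int) (B : List Int) : Int :=
  let Bs := PySem.List.sorted B (fun x => x)          -- B.sort()
  let As := PySem.List.sorted A (fun x => x)          -- As = sorted(A)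
  -- for b in B: if i < len(As) and As[i] < b: i += 1
  ((Bs.foldl (fun i b => if i < As.length then (if As.getD i 0 < b then i + 1 else i) else i)
    (0 : Nat) : Nat) : Int)

-- ===== PRECONDITION & SPEC =====
def Spec_solution (A : List Int) (B : List Int) (out : Int) : Prop := out = solution_alt A B
instance (A : List Int) (B : List Int) (out : Int) : Decidable (Spec_solution A B out) := by unfold Spec_solution; infer_instance

-- ===== CLAIM (what is proved, stated in full; the proofs are below) =====
def Claim_equal_solution : Prop := ∀ (A : List Int) (B : List Int), Dom_solution A B → Spec_solution A B (solution A B)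

-- ===== LEMMAS AND PROOFS =====

theorem skipUsed_not_mem (S : PySem.Set Nat) (i : Nat) : skipUsed S i ∉ S := by
  fun_induction skipUsed with
  | case1 i h ih => exact ih
  | case2 i h => exact h

theorem skipUsed_le (S : PySem.Set Nat) (i : Nat) : i ≤ skipUsed S i := by
  fun_induction skipUsed with
  | case1 i h ih => omega
  | case2 i h => exact le_refl i

theorem skipUsed_mem_of_lt (S : PySem.Set Nat) (i : Nat) :
    ∀ q, i ≤ q → q < skipUsed S i → q ∈ S := by
  fun_induction skipUsed with
  | case1 i h ih =>
    intro q hq hq'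
    rcases Nat.eq_or_lt_of_le hq with rfl | hlt
    · exact h
    · exact ih q hlt hq'
  | case2 i h => intro q hq hq'; omega

theorem skipUsed_eq_of (S : PySem.Set Nat) (i p : Nat)
    (h1 : i ≤ p) (h2 : p ∉ S) (h3 : ∀ q, i ≤ q → q < p → q ∈ S) :
    skipUsed S i = p := by
  rcases Nat.lt_trichotomy (skipUsed S i) p with h | h | h
  · exact absurd (h3 _ (skipUsed_le S i) h) (skipUsed_not_mem S i)
  · exact h
  · exact absurd (skipUsed_mem_of_lt S i p h1 h) h2

theorem skipUsed_congr (S T : PySem.Set Nat) (i : Nat) (h : ∀ k, k ∈ S ↔ k ∈ T) :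
    skipUsed S i = skipUsed T i := by
  refine skipUsed_eq_of S i _ (skipUsed_le T i) (fun hm => (skipUsed_not_mem T i) ((h _).mp hm))
    (fun q hq hq' => (h q).mpr (skipUsed_mem_of_lt T i q hq hq'))

theorem skipUsed_mono (S : PySem.Set Nat) (i j : Nat) (h : i ≤ j) :
    skipUsed S i ≤ skipUsed S j := by
  by_contra hlt
  push_neg at hlt
  exact skipUsed_not_mem S j
    (skipUsed_mem_of_lt S i _ (le_trans h (skipUsed_le S j)) hlt)

def stepA (Bs : List Int) (st : PySem.Set Nat × Int) (a : Int) : PySem.Set Nat × Int :=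
  let idx := skipUsed st.1 (PySem.List.bisectRight Bs a)
  if idx < Bs.length then (st.1.add idx, st.2 + 1) else st

-- the insertion step, abstracted over the start index of the search
def insP (m : Nat) (st : PySem.Set Nat × Int) (t : Nat) : PySem.Set Nat × Int :=
  if skipUsed st.1 t < m then (st.1.add (skipUsed st.1 t), st.2 + 1) else st

theorem stepA_eq_insP (Bs : List Int) (st : PySem.Set Nat × Int) (a : Int) :
    stepA Bs st a = insP Bs.length st (PySem.List.bisectRight Bs a) := rfl

def Rst (s t : PySem.Set Nat × Int) : Prop := s.2 = t.2 ∧ ∀ k : Nat, k ∈ s.1 ↔ k ∈ t.1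

theorem Rst_refl (s : PySem.Set Nat × Int) : Rst s s := ⟨rfl, fun _ => Iff.rfl⟩

theorem Rst_trans {s t u : PySem.Set Nat × Int} (h1 : Rst s t) (h2 : Rst t u) : Rst s u :=
  ⟨h1.1.trans h2.1, fun k => (h1.2 k).trans (h2.2 k)⟩

theorem Rst_symm {s t : PySem.Set Nat × Int} (h : Rst s t) : Rst t s :=
  ⟨h.1.symm, fun k => (h.2 k).symm⟩

theorem insP_pos {m : Nat} {S : PySem.Set Nat} {c : Int} {t : Nat}
    (h : skipUsed S t < m) : insP m (S, c) t = (S.add (skipUsed S t), c + 1) := by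
  unfold insP; rw [if_pos h]

theorem insP_neg {m : Nat} {S : PySem.Set Nat} {c : Int} {t : Nat}
    (h : ¬ skipUsed S t < m) : insP m (S, c) t = (S, c) := by
  unfold insP; rw [if_neg h]

theorem stepA_congr (Bs : List Int) {s t : PySem.Set Nat × Int} (h : Rst s t) (a : Int) :
    Rst (stepA Bs s a) (stepA Bs t a) := by
  obtain ⟨S, c⟩ := s
  obtain ⟨T, d⟩ := t
  obtain ⟨hc, hm⟩ := h
  simp only at hc
  have hskip : skipUsed S (PySem.List.bisectRight Bs a)
      = skipUsed T (PySem.List.bisectRight Bs a) := skipUsed_congr _ _ _ hm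
  rw [stepA_eq_insP, stepA_eq_insP]
  by_cases h1 : skipUsed S (PySem.List.bisectRight Bs a) < Bs.length
  · rw [insP_pos h1, insP_pos (hskip ▸ h1)]
    refine ⟨by simp [hc], fun k => ?_⟩
    simp only [PySem.Set.mem_add, ← hskip]
    rw [hskip]
    exact or_congr (hm k) Iff.rfl
  · rw [insP_neg h1, insP_neg (hskip ▸ h1)]
    exact ⟨hc, hm⟩

theorem insP_comm (m : Nat) (S : PySem.Set Nat) (c : Int) (t1 t2 : Nat) (hts : t1 ≤ t2) :
    Rst (insP m (insP m (S, c) t1) t2) (insP m (insP m (S, c) t2) t1) := by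
  have hp1le : t1 ≤ skipUsed S t1 := skipUsed_le S t1
  have hp2le : t2 ≤ skipUsed S t2 := skipUsed_le S t2
  have hp1nm : skipUsed S t1 ∉ S := skipUsed_not_mem S t1
  have hp2nm : skipUsed S t2 ∉ S := skipUsed_not_mem S t2
  by_cases hp : skipUsed S t1 < t2
  · -- the two searches do not interact
    have hfA : skipUsed (S.add (skipUsed S t1)) t2 = skipUsed S t2 := by
      refine skipUsed_eq_of _ _ _ hp2le ?_ ?_
      · intro hmem
        rcases (PySem.Set.mem_add S _ _).mp hmem with h | h
        · exact hp2nm h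
        · omega
      · intro q hq hq'
        exact (PySem.Set.mem_add S _ _).mpr (Or.inl (skipUsed_mem_of_lt S t2 q hq hq'))
    have hfB : skipUsed (S.add (skipUsed S t2)) t1 = skipUsed S t1 := by
      have hne : skipUsed S t1 ≠ skipUsed S t2 := by omega
      refine skipUsed_eq_of _ _ _ hp1le ?_ ?_
      · intro hmem
        rcases (PySem.Set.mem_add S _ _).mp hmem with h | h
        · exact hp1nm h
        · exact hne h
      · intro q hq hq'
        exact (PySem.Set.mem_add S _ _).mpr (Or.inl (skipUsed_mem_of_lt S t1 q hq hq'))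
    by_cases h1 : skipUsed S t1 < m
    · by_cases h2 : skipUsed S t2 < m
      · rw [insP_pos h1, insP_pos h2, insP_pos (by rw [hfA]; exact h2),
          insP_pos (by rw [hfB]; exact h1), hfA, hfB]
        refine ⟨by ring, fun k => ?_⟩
        simp only [PySem.Set.mem_add]
        tauto
      · rw [insP_pos h1, insP_neg h2, insP_neg (by rw [hfA]; exact h2), insP_pos h1]
        exact Rst_refl _
    · have h2 : ¬ skipUsed S t2 < m := by omega
      rw [insP_neg h1, insP_neg h2, insP_neg h1]
      exact Rst_refl _
  · -- both searches find the same spot first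
    push_neg at hp
    have he2 : skipUsed S t2 = skipUsed S t1 := by
      refine skipUsed_eq_of _ _ _ hp hp1nm ?_
      intro q hq hq'
      exact skipUsed_mem_of_lt S t1 q (le_trans hts hq) hq'
    have hqle : skipUsed S t1 + 1 ≤ skipUsed S (skipUsed S t1 + 1) :=
      skipUsed_le S (skipUsed S t1 + 1)
    have hq_of : ∀ t, t ≤ skipUsed S t1 + 1 → (∀ r, t ≤ r → r < skipUsed S t1 → r ∈ S) →
        skipUsed (S.add (skipUsed S t1)) t = skipUsed S (skipUsed S t1 + 1) := by
      intro t ht hint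
      refine skipUsed_eq_of _ _ _ (by omega) ?_ ?_
      · intro hmem
        rcases (PySem.Set.mem_add S _ _).mp hmem with h | h
        · exact skipUsed_not_mem S _ h
        · omega
      · intro r hr hr'
        rcases Nat.lt_trichotomy r (skipUsed S t1) with h | h | h
        · exact (PySem.Set.mem_add S _ _).mpr (Or.inl (hint r hr h))
        · exact (PySem.Set.mem_add S _ _).mpr (Or.inr h)
        · exact (PySem.Set.mem_add S _ _).mpr
            (Or.inl (skipUsed_mem_of_lt S (skipUsed S t1 + 1) r h hr'))
    have hfA : skipUsed (S.add (skipUsed S t1)) t2 = skipUsed S (skipUsed S t1 + 1) :=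
      hq_of t2 (by omega) (fun r hr hr' => skipUsed_mem_of_lt S t1 r (le_trans hts hr) hr')
    have hfB : skipUsed (S.add (skipUsed S t1)) t1 = skipUsed S (skipUsed S t1 + 1) :=
      hq_of t1 (by omega) (fun r hr hr' => skipUsed_mem_of_lt S t1 r hr hr')
    by_cases h1 : skipUsed S t1 < m
    · rw [insP_pos h1, insP_pos (he2 ▸ h1 : skipUsed S t2 < m), he2]
      by_cases hq : skipUsed S (skipUsed S t1 + 1) < m
      · rw [insP_pos (by rw [hfA]; exact hq), insP_pos (by rw [hfB]; exact hq), hfA, hfB]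
        exact Rst_refl _
      · rw [insP_neg (by rw [hfA]; exact hq), insP_neg (by rw [hfB]; exact hq)]
        exact Rst_refl _
    · have h2 : ¬ skipUsed S t2 < m := by rw [he2]; exact h1
      rw [insP_neg h1, insP_neg h2, insP_neg h1]
      exact Rst_refl _

theorem stepA_comm (Bs : List Int) (s : PySem.Set Nat × Int) (a b : Int) :
    Rst (stepA Bs (stepA Bs s a) b) (stepA Bs (stepA Bs s b) a) := by
  obtain ⟨S, c⟩ := s
  simp only [stepA_eq_insP]
  rcases le_total (PySem.List.bisectRight Bs a) (PySem.List.bisectRight Bs b) with h | h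
  · exact insP_comm Bs.length S c _ _ h
  · exact Rst_symm (insP_comm Bs.length S c _ _ h)

theorem foldl_congr_Rst (Bs : List Int) (l : List Int) :
    ∀ {s t : PySem.Set Nat × Int}, Rst s t →
      Rst (l.foldl (stepA Bs) s) (l.foldl (stepA Bs) t) := by
  induction l with
  | nil => exact fun h => h
  | cons x xs ih => exact fun h => ih (stepA_congr Bs h x)

theorem foldl_perm_Rst (Bs : List Int) {l l' : List Int} (hp : l.Perm l') :
    ∀ s : PySem.Set Nat × Int, Rst (l.foldl (stepA Bs) s) (l'.foldl (stepA Bs) s) := by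
  induction hp with
  | nil => exact fun s => Rst_refl _
  | cons x _ ih => exact fun s => ih (stepA Bs s x)
  | swap x y l => exact fun s => foldl_congr_Rst Bs l (stepA_comm Bs s y x)
  | trans _ _ ih1 ih2 => exact fun s => Rst_trans (ih1 s) (ih2 s)

-- the two-pointer sweep, consuming both sorted lists
def tp : List Int → List Int → Nat
  | _, [] => 0
  | [], _ :: _ => 0
  | a :: as, b :: bs => if a < b then tp as bs + 1 else tp (a :: as) bs
termination_by as bs => bs.length

theorem tp_nil_left (bs : List Int) : tp [] bs = 0 := by
  cases bs <;> simp [tp]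

theorem tp_cons (a : Int) (as : List Int) (b : Int) (bs : List Int) :
    tp (a :: as) (b :: bs) = if a < b then tp as bs + 1 else tp (a :: as) bs := by
  simp [tp]

theorem tp_drop_step (Bs : List Int) (a : Int) (as : List Int) (k : Nat)
    (hk : k < Bs.length) (hle : Bs.getD k 0 ≤ a) :
    tp (a :: as) (Bs.drop k) = tp (a :: as) (Bs.drop (k + 1)) := by
  rw [List.drop_eq_getElem_cons hk, tp_cons,
    if_neg (by rw [List.getD_eq_getElem Bs 0 hk] at hle; omega)]

theorem tp_drop_many (Bs : List Int) (a : Int) (as : List Int) :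
    ∀ (d j : Nat), j + d ≤ Bs.length →
      (∀ k, j ≤ k → k < j + d → Bs.getD k 0 ≤ a) →
      tp (a :: as) (Bs.drop j) = tp (a :: as) (Bs.drop (j + d)) := by
  intro d
  induction d with
  | zero => intro j _ _; rfl
  | succ d ih =>
    intro j hlen hall
    have : tp (a :: as) (Bs.drop j) = tp (a :: as) (Bs.drop (j + d)) :=
      ih j (by omega) (fun k hk hk' => hall k hk (by omega))
    rw [this, show j + (d + 1) = (j + d) + 1 by omega]
    exact tp_drop_step Bs a as (j + d) (by omega) (hall (j + d) (by omega) (by omega))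

theorem bisect_mono (Bs : List Int) (hBs : Bs.Pairwise (· ≤ ·)) (a a' : Int) (h : a ≤ a') :
    PySem.List.bisectRight Bs a ≤ PySem.List.bisectRight Bs a' := by
  obtain ⟨hlen, hlt, _⟩ := PySem.List.bisectRight_spec Bs a hBs
  obtain ⟨hlen', _, hge'⟩ := PySem.List.bisectRight_spec Bs a' hBs
  by_contra hc
  push_neg at hc
  have h1 : PySem.List.bisectRight Bs a' < Bs.length := by omega
  have h2 := hge' _ h1 (le_refl _)
  have h3 := hlt _ h1 hc
  omega

theorem fold_allfail (Bs : List Int) :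
    ∀ (as : List Int) (S : PySem.Set Nat) (c : Int),
      (∀ a' ∈ as, ¬ skipUsed S (PySem.List.bisectRight Bs a') < Bs.length) →
      as.foldl (stepA Bs) (S, c) = (S, c) := by
  intro as
  induction as with
  | nil => intro S c _; rfl
  | cons a as ih =>
    intro S c h
    have : stepA Bs (S, c) a = (S, c) := by
      rw [stepA_eq_insP]
      exact insP_neg (h a (List.mem_cons_self))
    rw [List.foldl_cons, this]
    exact ih S c (fun a' ha' => h a' (List.mem_cons_of_mem a ha'))

theorem greedy_inv (Bs : List Int) (hBs : Bs.Pairwise (· ≤ ·)) :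
    ∀ (as : List Int), as.Pairwise (· ≤ ·) →
    ∀ (S : PySem.Set Nat) (c : Int) (j : Nat),
      j ≤ Bs.length →
      (∀ k ∈ S, k < j) →
      (∀ k, k < j → k ∉ S → ∀ a ∈ as, Bs.getD k 0 ≤ a) →
      (as.foldl (stepA Bs) (S, c)).2 = c + (tp as (Bs.drop j) : Int) := by
  intro as
  induction as with
  | nil => intro _ S c j _ _ _; simp [tp_nil_left]
  | cons a as ih =>
    intro hpair S c j hjlen hS hout
    obtain ⟨haas, has⟩ := List.pairwise_cons.mp hpair
    obtain ⟨htlen, hlt_le, hge_gt⟩ := PySem.List.bisectRight_spec Bs a hBs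
    rw [List.foldl_cons, stepA_eq_insP]
    rcases le_total (PySem.List.bisectRight Bs a) j with htj | hjt
    · -- the search starts at or below j: it lands exactly on j
      have hsk : skipUsed S (PySem.List.bisectRight Bs a) = j := by
        refine skipUsed_eq_of _ _ _ htj (fun hm => by have := hS _ hm; omega) ?_
        intro q hq hq'
        by_contra hqS
        have h1 := hout q hq' hqS a (List.mem_cons_self)
        have h2 := hge_gt q (by omega) hq
        rw [List.getD_eq_getElem Bs 0 (by omega)] at h1
        omega
      by_cases hjm : j < Bs.length
      · rw [insP_pos (by rw [hsk]; exact hjm), hsk]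
        have hstep := ih has (S.add j) (c + 1) (j + 1) (by omega)
          (fun k hk => by
            rcases (PySem.Set.mem_add S j k).mp hk with h | h
            · have := hS _ h; omega
            · omega)
          (fun k hk hkS a' ha' => by
            have hkj : k < j := by
              rcases Nat.lt_or_ge k j with h | h
              · exact h
              · exfalso; exact hkS ((PySem.Set.mem_add S j k).mpr (Or.inr (by omega)))
            exact hout k hkj (fun hm => hkS ((PySem.Set.mem_add S j k).mpr (Or.inl hm)))
              a' (List.mem_cons_of_mem a ha'))
        rw [hstep]
        rw [List.drop_eq_getElem_cons hjm, tp_cons, if_pos (hge_gt j hjm htj)]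
        push_cast
        ring
      · -- j = Bs.length: this and every later element fails
        have hjeq : j = Bs.length := by omega
        rw [insP_neg (by rw [hsk]; omega)]
        rw [fold_allfail Bs as S c (fun a' ha' h => by
          have h1 : skipUsed S (PySem.List.bisectRight Bs a)
              ≤ skipUsed S (PySem.List.bisectRight Bs a') :=
            skipUsed_mono S _ _ (bisect_mono Bs hBs a a' (haas a' ha'))
          omega)]
        rw [hjeq, List.drop_length]
        simp [tp]
    · -- the search starts above j: everything from the start index up is free
      have hsk : skipUsed S (PySem.List.bisectRight Bs a) = PySem.List.bisectRight Bs a := by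
        refine skipUsed_eq_of _ _ _ (le_refl _) (fun hm => by have := hS _ hm; omega) ?_
        intro q hq hq'; omega
      have hdrop : tp (a :: as) (Bs.drop j)
          = tp (a :: as) (Bs.drop (PySem.List.bisectRight Bs a)) := by
        have := tp_drop_many Bs a as (PySem.List.bisectRight Bs a - j) j (by omega)
          (fun k hk hk' => by
            rw [List.getD_eq_getElem Bs 0 (by omega)]
            exact hlt_le k (by omega) (by omega))
        rw [this, show j + (PySem.List.bisectRight Bs a - j) = PySem.List.bisectRight Bs a
          by omega]
      by_cases htm : PySem.List.bisectRight Bs a < Bs.length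
      · rw [insP_pos (by rw [hsk]; exact htm), hsk]
        have hstep := ih has (S.add (PySem.List.bisectRight Bs a)) (c + 1)
          (PySem.List.bisectRight Bs a + 1) (by omega)
          (fun k hk => by
            rcases (PySem.Set.mem_add S _ k).mp hk with h | h
            · have := hS _ h; omega
            · omega)
          (fun k hk hkS a' ha' => by
            have hkt : k < PySem.List.bisectRight Bs a := by
              rcases Nat.lt_or_ge k (PySem.List.bisectRight Bs a) with h | h
              · exact h
              · exfalso; exact hkS ((PySem.Set.mem_add S _ k).mpr (Or.inr (by omega)))
            rcases Nat.lt_or_ge k j with hkj | hkj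
            · exact hout k hkj (fun hm => hkS ((PySem.Set.mem_add S _ k).mpr (Or.inl hm)))
                a' (List.mem_cons_of_mem a ha')
            · rw [List.getD_eq_getElem Bs 0 (by omega)]
              have h1 := hlt_le k (by omega) hkt
              have h2 := haas a' ha'
              omega)
        rw [hstep, hdrop]
        rw [List.drop_eq_getElem_cons htm, tp_cons, if_pos (hge_gt _ htm (le_refl _))]
        push_cast
        ring
      · -- the start index is already past the end: this and all later elements fail
        rw [insP_neg (by rw [hsk]; exact htm)]
        rw [fold_allfail Bs as S c (fun a' ha' h => by
          have h1 : skipUsed S (PySem.List.bisectRight Bs a)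
              ≤ skipUsed S (PySem.List.bisectRight Bs a') :=
            skipUsed_mono S _ _ (bisect_mono Bs hBs a a' (haas a' ha'))
          omega)]
        have hteq : PySem.List.bisectRight Bs a = Bs.length := by omega
        rw [hdrop, hteq, List.drop_length]
        simp [tp]

theorem solution_eq_fold (A B : List Int) :
    solution A B
      = ((A.foldl (stepA (PySem.List.sorted B (fun x => x))) (PySem.Set.empty, 0)).2 : Int) := rfl

theorem foldl_tp (As : List Int) :
    ∀ (bs : List Int) (i : Nat),
      bs.foldl (fun i b => if i < As.length then (if As.getD i 0 < b then i + 1 else i) else i) i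
        = i + tp (As.drop i) bs := by
  intro bs
  induction bs with
  | nil => intro i; cases h : As.drop i <;> simp [tp]
  | cons b bs ih =>
    intro i
    rw [List.foldl_cons]
    by_cases hi : i < As.length
    · rw [List.drop_eq_getElem_cons hi, tp_cons]
      by_cases hab : As.getD i 0 < b
      · rw [if_pos hi, if_pos hab, ih (i + 1),
          if_pos (by rw [List.getD_eq_getElem As 0 hi] at hab; exact hab)]
        omega
      · rw [if_pos hi, if_neg hab,
          if_neg (by rw [List.getD_eq_getElem As 0 hi] at hab; exact hab), ih i,
          List.drop_eq_getElem_cons hi]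
    · have hd : As.drop i = [] := List.drop_eq_nil_of_le (by omega)
      rw [if_neg hi, ih i, hd, tp_nil_left, tp_nil_left]

-- ===== VERDICT (by name: the statement is the Claim_ definition above) =====
theorem solution_spec : Claim_equal_solution := by
  unfold Claim_equal_solution
  intro A B _
  unfold Spec_solution
  have hBs : (PySem.List.sorted B (fun x => x)).Pairwise (· ≤ ·) := by
    simpa using PySem.List.sorted_pairwise B (fun x => x)
  have hAs : (PySem.List.sorted A (fun x => x)).Pairwise (· ≤ ·) := by
    simpa using PySem.List.sorted_pairwise A (fun x => x)
  have hperm : A.Perm (PySem.List.sorted A (fun x => x)) :=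
    (PySem.List.sorted_perm A (fun x => x) false).symm
  have hR := foldl_perm_Rst (PySem.List.sorted B (fun x => x)) hperm
    ((PySem.Set.empty : PySem.Set Nat), (0 : Int))
  have hL : solution A B
      = ((PySem.List.sorted A (fun x => x)).foldl
          (stepA (PySem.List.sorted B (fun x => x))) (PySem.Set.empty, 0)).2 := by
    rw [solution_eq_fold]
    exact hR.1
  have hG := greedy_inv (PySem.List.sorted B (fun x => x)) hBs
    (PySem.List.sorted A (fun x => x)) hAs PySem.Set.empty 0 0 (by omega)
    (fun k hk => absurd hk (List.not_mem_nil))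
    (fun k hk => by omega)
  rw [List.drop_zero] at hG
  have hAlt : solution_alt A B
      = ((tp (PySem.List.sorted A (fun x => x)) (PySem.List.sorted B (fun x => x)) : Nat) : Int) := by
    show (((PySem.List.sorted B (fun x => x)).foldl
        (fun i b => if i < (PySem.List.sorted A (fun x => x)).length
          then (if (PySem.List.sorted A (fun x => x)).getD i 0 < b then i + 1 else i)
          else i) (0 : Nat) : Nat) : Int) = _
    rw [foldl_tp, List.drop_zero]
    omega
  rw [hL, hG, hAlt]
  omega
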